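-- pv_equiv track=rewrite | github.com/koki-asami/roof_img_processing | sandbox/aero2roof.py | make_circle_list
-- ===== SOURCE A (Python) =====
-- def make_circle_list(polygon_x, polygon_y, circle_list=[], c=[], k_list=[], k=[], e_list=[], e=[]):
--     circle_list = []
--     c = []
--     k_list = []
--     k = []
--     e_list = []
--     e = []
--     for i in range(len(polygon_x)):
--         if c == []:
--             c.append(i)
--             k.append(polygon_x[i])
--             e.append(polygon_y[i])
--         else:
--             if not (polygon_x[i] == polygon_x[c[0]] and polygon_y[i] == polygon_y[c[0]]):
--                 c.append(i)
--                 k.append(polygon_x[i])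
--                 e.append(polygon_y[i])
--             else:
--                 c.append(i)
--                 k.append(polygon_x[i])
--                 e.append(polygon_y[i])
--                 circle_list.append(c)
--                 k_list.append(k)
--                 e_list.append(e)
--                 c = []
--                 k = []
--                 e = []
--     return circle_list
-- ===== SOURCE B (Python) =====
-- def make_circle_list(polygon_x, polygon_y, circle_list=[], c=[], k_list=[], k=[], e_list=[], e=[]):
--     circle_list = []
--     n = len(polygon_x)
--     i = 0
--     while i < n:
--         sx, sy = polygon_x[i], polygon_y[i]
--         j = i + 1
--         while j < n and not (polygon_x[j] == sx and polygon_y[j] == sy):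
--             j += 1
--         if j < n:
--             circle_list.append(list(range(i, j + 1)))
--             i = j + 1
--         else:
--             break
--     return circle_list
-- ===== Notes on version B (the rewrite author's own statement) =====
-- stated objective: simpler
-- what changed: Replaces the flat accumulate-and-close fold over four parallel mutable lists (c/k/e plus the dead k_list/e_list) with an outer loop over group start positions and an inner boundary scan that emits each closed group as list(range(i, j+1)), dropping the dead parallel lists entirely.
import Mathlib
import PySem

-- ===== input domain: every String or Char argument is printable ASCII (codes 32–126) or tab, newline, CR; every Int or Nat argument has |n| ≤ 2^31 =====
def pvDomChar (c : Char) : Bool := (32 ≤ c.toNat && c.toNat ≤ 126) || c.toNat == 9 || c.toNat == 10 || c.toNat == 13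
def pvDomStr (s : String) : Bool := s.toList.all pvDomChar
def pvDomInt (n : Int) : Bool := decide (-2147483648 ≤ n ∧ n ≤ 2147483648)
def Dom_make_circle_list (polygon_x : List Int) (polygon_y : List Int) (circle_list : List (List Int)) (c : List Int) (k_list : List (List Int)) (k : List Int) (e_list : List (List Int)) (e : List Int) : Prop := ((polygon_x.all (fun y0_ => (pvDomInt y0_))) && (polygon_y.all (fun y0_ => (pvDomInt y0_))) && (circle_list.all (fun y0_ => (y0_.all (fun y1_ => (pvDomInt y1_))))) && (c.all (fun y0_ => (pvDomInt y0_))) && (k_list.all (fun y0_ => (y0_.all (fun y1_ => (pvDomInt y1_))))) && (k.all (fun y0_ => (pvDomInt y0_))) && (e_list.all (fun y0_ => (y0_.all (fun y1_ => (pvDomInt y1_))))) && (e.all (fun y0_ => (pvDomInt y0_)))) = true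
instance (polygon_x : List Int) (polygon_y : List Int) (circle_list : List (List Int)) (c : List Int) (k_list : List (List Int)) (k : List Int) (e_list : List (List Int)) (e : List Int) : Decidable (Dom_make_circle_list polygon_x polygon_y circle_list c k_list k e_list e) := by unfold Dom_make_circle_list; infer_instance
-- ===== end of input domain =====

-- ===== PORT A =====
-- B replaces A's accumulate-and-close fold (with dead k/e parallel lists) by a
-- start-position/boundary-scan loop emitting index ranges; return values proved equal.

-- shared total getter: exact Python xs[i] on every in-range access both programs make
def pvGetI (xs : List Int) (i : Int) : Int := (PySem.List.pyGet? xs i).getD 0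

def pvStepA (px py : List Int)
    (s : List (List Int) × List Int × List (List Int) × List Int × List (List Int) × List Int)
    (i : Nat) :
    List (List Int) × List Int × List (List Int) × List Int × List (List Int) × List Int :=
  match s with
  | (cl, c, kl, k, el, e) =>
    if c = [] then
      (cl, c ++ [(i : Int)], kl, k ++ [pvGetI px (i : Int)], el, e ++ [pvGetI py (i : Int)])
    else
      let c0 := (PySem.List.pyGet? c 0).getD 0
      if ¬ (pvGetI px (i : Int) = pvGetI px c0 ∧ pvGetI py (i : Int) = pvGetI py c0) then
        (cl, c ++ [(i : Int)], kl, k ++ [pvGetI px (i : Int)], el, e ++ [pvGetI py (i : Int)])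
      else
        (cl ++ [c ++ [(i : Int)]], [], kl ++ [k ++ [pvGetI px (i : Int)]], [],
         el ++ [e ++ [pvGetI py (i : Int)]], [])

def make_circle_list (polygon_x : List Int) (polygon_y : List Int) (circle_list : List (List Int)) (c : List Int) (k_list : List (List Int)) (k : List Int) (e_list : List (List Int)) (e : List Int) : List (List Int) :=
  ((List.range polygon_x.length).foldl (pvStepA polygon_x polygon_y)
    ([], [], [], [], [], [])).1

-- ===== PORT B =====
-- inner while: first index j (i+1 ≤ j) with a match, or n if none
def pvScan (px py : List Int) (n : Nat) (sx sy : Int) (j : Nat) : Nat :=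
  if j < n then
    if pvGetI px (j : Int) = sx ∧ pvGetI py (j : Int) = sy then j
    else pvScan px py n sx sy (j + 1)
  else j
termination_by n - j

lemma pvScan_ge (px py : List Int) (n : Nat) (sx sy : Int) :
    ∀ j, j ≤ pvScan px py n sx sy j := by
  intro j
  induction hm : n - j using Nat.strong_induction_on generalizing j with
  | _ m ih =>
    rw [pvScan]
    split_ifs with h1 h2
    · exact le_refl _
    · exact le_trans (Nat.le_succ j) (ih (n - (j + 1)) (by omega) (j + 1) rfl)
    · exact le_refl _

def pvOuter (px py : List Int) (n : Nat) (i : Nat) (acc : List (List Int)) : List (List Int) :=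
  if i < n then
    if pvScan px py n (pvGetI px (i : Int)) (pvGetI py (i : Int)) (i + 1) < n then
      pvOuter px py n (pvScan px py n (pvGetI px (i : Int)) (pvGetI py (i : Int)) (i + 1) + 1)
        (acc ++ [(List.range' i
            (pvScan px py n (pvGetI px (i : Int)) (pvGetI py (i : Int)) (i + 1) + 1 - i)).map
            (fun t => (t : Int))])
    else acc
  else acc
termination_by n - i
decreasing_by
  have := pvScan_ge px py n (pvGetI px (i : Int)) (pvGetI py (i : Int)) (i + 1)
  omega

def make_circle_list_alt (polygon_x : List Int) (polygon_y : List Int) (circle_list : List (List Int)) (c : List Int) (k_list : List (List Int)) (k : List Int) (e_list : List (List Int)) (e : List Int) : List (List Int) :=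
  pvOuter polygon_x polygon_y polygon_x.length 0 []

-- ===== PRECONDITION & SPEC =====
-- Pre_ excludes exactly the inputs where Python A raises IndexError: polygon_y shorter
-- than polygon_x (A reads polygon_y[i] for every i < len(polygon_x)); B raises there too.
def Pre_make_circle_list (polygon_x : List Int) (polygon_y : List Int) (circle_list : List (List Int)) (c : List Int) (k_list : List (List Int)) (k : List Int) (e_list : List (List Int)) (e : List Int) : Prop :=
  polygon_x.length ≤ polygon_y.length
instance (polygon_x : List Int) (polygon_y : List Int) (circle_list : List (List Int)) (c : List Int) (k_list : List (List Int)) (k : List Int) (e_list : List (List Int)) (e : List Int) : Decidable (Pre_make_circle_list polygon_x polygon_y circle_list c k_list k e_list e) := by unfold Pre_make_circle_list; infer_instance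

def pvWitness_make_circle_list : List Int × List Int × List (List Int) × List Int × List (List Int) × List Int × List (List Int) × List Int :=
  ([0, 1, 0, 2, 2], [0, 2, 0, 3, 3], [], [], [], [], [], [])

def Spec_make_circle_list (polygon_x : List Int) (polygon_y : List Int) (circle_list : List (List Int)) (c : List Int) (k_list : List (List Int)) (k : List Int) (e_list : List (List Int)) (e : List Int) (out : List (List Int)) : Prop := out = make_circle_list_alt polygon_x polygon_y circle_list c k_list k e_list e
instance (polygon_x : List Int) (polygon_y : List Int) (circle_list : List (List Int)) (c : List Int) (k_list : List (List Int)) (k : List Int) (e_list : List (List Int)) (e : List Int) (out : List (List Int)) : Decidable (Spec_make_circle_list polygon_x polygon_y circle_list c k_list k e_list e out) := by unfold Spec_make_circle_list; infer_instance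

-- ===== CLAIM (what is proved, stated in full; the proofs are below) =====
def Claim_equal_make_circle_list : Prop := ∀ (polygon_x : List Int) (polygon_y : List Int) (circle_list : List (List Int)) (c : List Int) (k_list : List (List Int)) (k : List Int) (e_list : List (List Int)) (e : List Int), Dom_make_circle_list polygon_x polygon_y circle_list c k_list k e_list e → Pre_make_circle_list polygon_x polygon_y circle_list c k_list k e_list e → Spec_make_circle_list polygon_x polygon_y circle_list c k_list k e_list e (make_circle_list polygon_x polygon_y circle_list c k_list k e_list e)

-- ===== LEMMAS AND PROOFS =====

-- the control-relevant projection of A's fold state: only (circle_list, c)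
def pvStepC (px py : List Int) (s : List (List Int) × List Int) (i : Nat) :
    List (List Int) × List Int :=
  match s with
  | (cl, c) =>
    if c = [] then (cl, c ++ [(i : Int)])
    else
      let c0 := (PySem.List.pyGet? c 0).getD 0
      if ¬ (pvGetI px (i : Int) = pvGetI px c0 ∧ pvGetI py (i : Int) = pvGetI py c0) then
        (cl, c ++ [(i : Int)])
      else
        (cl ++ [c ++ [(i : Int)]], [])

lemma pvFoldA_fst (px py : List Int) :
    ∀ (l : List Nat) cl c kl k el e,
      ((l.foldl (pvStepA px py) (cl, c, kl, k, el, e)).1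
        = (l.foldl (pvStepC px py) (cl, c)).1) := by
  intro l
  induction l with
  | nil => intro cl c kl k el e; rfl
  | cons a l ih =>
    intro cl c kl k el e
    simp only [List.foldl_cons, pvStepA, pvStepC]
    split_ifs <;> exact ih _ _ _ _ _ _

def pvOpenc (i j : Nat) : List Int := (List.range' i (j - i)).map (fun t => (t : Int))

lemma pvOpenc_head (i j : Nat) (h : i < j) :
    (PySem.List.pyGet? (pvOpenc i j) 0).getD 0 = (i : Int) := by
  obtain ⟨d, hd⟩ : ∃ d, j - i = d + 1 := ⟨j - i - 1, by omega⟩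
  simp [pvOpenc, hd, List.range'_succ]

lemma pvOpenc_snoc (i j : Nat) (h : i ≤ j) :
    pvOpenc i j ++ [(j : Int)] = pvOpenc i (j + 1) := by
  have h1 : j + 1 - i = (j - i) + 1 := by omega
  have h2 : i + (j - i) = j := by omega
  simp [pvOpenc, h1, List.range'_concat, h2]

lemma pvOpenc_ne_nil (i j : Nat) (h : i < j) : pvOpenc i j ≠ [] := by
  obtain ⟨d, hd⟩ : ∃ d, j - i = d + 1 := ⟨j - i - 1, by omega⟩
  simp [pvOpenc, hd, List.range'_succ]

lemma pv_open (px py : List Int) (n : Nat) :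
    ∀ (m i j : Nat) (cl : List (List Int)), i < j → n - j = m →
      ((List.range' j (n - j)).foldl (pvStepC px py) (cl, pvOpenc i j)).1
        = (if pvScan px py n (pvGetI px (i : Int)) (pvGetI py (i : Int)) j < n then
            ((List.range' (pvScan px py n (pvGetI px (i : Int)) (pvGetI py (i : Int)) j + 1)
                (n - (pvScan px py n (pvGetI px (i : Int)) (pvGetI py (i : Int)) j + 1))).foldl
              (pvStepC px py)
              (cl ++ [pvOpenc i (pvScan px py n (pvGetI px (i : Int)) (pvGetI py (i : Int)) j + 1)], [])).1
          else cl) := by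
  intro m
  induction m with
  | zero =>
    intro i j cl hij hm
    have hjn : ¬ j < n := by omega
    rw [pvScan]
    simp [hm, hjn]
  | succ m ih =>
    intro i j cl hij hm
    have hjn : j < n := by omega
    have hrange : List.range' j (n - j) = j :: List.range' (j + 1) (n - (j + 1)) := by
      have hd : n - j = (n - (j + 1)) + 1 := by omega
      rw [hd, List.range'_succ]
    rw [hrange, List.foldl_cons, pvStepC]
    rw [if_neg (pvOpenc_ne_nil i j hij)]
    simp only [pvOpenc_head i j hij]
    rw [pvScan]
    by_cases hmatch : pvGetI px (j : Int) = pvGetI px (i : Int) ∧ pvGetI py (j : Int) = pvGetI py (i : Int)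
    · rw [if_neg (not_not_intro hmatch)]
      simp only [if_pos hjn, if_pos hmatch]
      rw [pvOpenc_snoc i j (by omega)]
    · rw [if_pos hmatch]
      simp only [if_pos hjn, if_neg hmatch]
      rw [pvOpenc_snoc i j (by omega)]
      exact ih i (j + 1) cl (by omega) (by omega)

lemma pv_empty (px py : List Int) (n : Nat) :
    ∀ (fuel i : Nat) (cl : List (List Int)), n - i ≤ fuel →
      ((List.range' i (n - i)).foldl (pvStepC px py) (cl, [])).1 = pvOuter px py n i cl := by
  intro fuel
  induction fuel with
  | zero =>
    intro i cl h
    have hin : ¬ i < n := by omega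
    have h0 : n - i = 0 := by omega
    rw [pvOuter, if_neg hin, h0]
    rfl
  | succ fuel ih =>
    intro i cl h
    by_cases hin : i < n
    · have hrange : List.range' i (n - i) = i :: List.range' (i + 1) (n - (i + 1)) := by
        have hd : n - i = (n - (i + 1)) + 1 := by omega
        rw [hd, List.range'_succ]
      rw [hrange, List.foldl_cons, pvStepC]
      rw [if_pos rfl]
      have hsingle : ([] : List Int) ++ [(i : Int)] = pvOpenc i (i + 1) := by
        simp [pvOpenc]
      rw [hsingle]
      rw [pv_open px py n (n - (i + 1)) i (i + 1) cl (by omega) rfl]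
      rw [pvOuter, if_pos hin]
      set s := pvScan px py n (pvGetI px (i : Int)) (pvGetI py (i : Int)) (i + 1) with hs
      by_cases hsn : s < n
      · rw [if_pos hsn, if_pos hsn]
        have hsge : i + 1 ≤ s := pvScan_ge px py n _ _ (i + 1)
        rw [ih (s + 1) _ (by omega)]
        rfl
      · rw [if_neg hsn, if_neg hsn]
    · have h0 : n - i = 0 := by omega
      rw [pvOuter, if_neg hin, h0]
      rfl

-- ===== VERDICT (by name: the statement is the Claim_ definition above) =====
theorem make_circle_list_spec : Claim_equal_make_circle_list := by
  intro polygon_x polygon_y circle_list c k_list k e_list e _ _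
  unfold Spec_make_circle_list make_circle_list make_circle_list_alt
  rw [pvFoldA_fst, List.range_eq_range']
  have h := pv_empty polygon_x polygon_y polygon_x.length polygon_x.length 0 [] (by omega)
  rw [Nat.sub_zero] at h
  exact h
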